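-- pv_equiv track=rewrite | github.com/deepakdhull80/CP | binarySearch/find_double_occurance.py | find
-- ===== SOURCE A (Python) =====
-- def find(arr):
-- 	l,r=0,len(arr)-1
-- 	while l<r:
-- 		mid =(l+r)//2
-- 		if arr[mid] != mid:
-- 			l=mid+1
-- 		else:
-- 			r=mid-1
-- 	return arr[l]
-- ===== SOURCE B (Python) =====
-- def find(arr):
--     def go(l, n):
--         if n <= 1:
--             return arr[l]
--         half = (n - 1) // 2
--         mid = l + half
--         if arr[mid] == mid:
--             return go(l, half)
--         return go(mid + 1, n - half - 1)
--     return go(0, len(arr))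
-- ===== Notes on version B (the rewrite author's own statement) =====
-- stated objective: alternative
-- what changed: The two-pointer while loop over (l, r) is replaced by a recursive helper over (offset l, interval length n) with the midpoint computed as l + (n-1)//2, the equality branch narrowing to length (n-1)//2; same decision path and return value, terminating structurally on n.
-- outside the precondition, e.g. on find([]): A raises IndexError, B raises IndexError
import Mathlib
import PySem

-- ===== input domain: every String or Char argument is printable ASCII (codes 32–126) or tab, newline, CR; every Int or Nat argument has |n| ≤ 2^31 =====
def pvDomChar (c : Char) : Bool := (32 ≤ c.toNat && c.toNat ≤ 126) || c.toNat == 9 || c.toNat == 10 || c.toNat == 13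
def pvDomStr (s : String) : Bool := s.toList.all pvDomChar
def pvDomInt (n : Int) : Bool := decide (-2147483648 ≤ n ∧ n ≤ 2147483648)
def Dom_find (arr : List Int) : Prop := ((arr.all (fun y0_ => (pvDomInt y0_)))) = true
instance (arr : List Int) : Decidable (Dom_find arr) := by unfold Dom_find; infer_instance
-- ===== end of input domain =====

-- B replaces A's two-pointer (l, r) while-loop by a recursive helper over an offset and a
-- Nat interval length n (midpoint l + (n-1)//2); same decision path — objective: alternative.


-- ===== PORT A =====
-- the while loop, as a tail-recursive function over the loop state (l, r).
-- fuel only makes the recursion structural: each iteration shrinks r - l by ≥ 1, so the fuel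
-- never runs out on the actual call; arr[i] is in range on every iteration for nonempty arr
-- (Pre_), so pyGet? … getD 0 is exact there.
def findLoop (arr : List Int) (fuel : Nat) (l r : Int) : Int :=
  match fuel with
  | 0 => (PySem.List.pyGet? arr l).getD 0
  | fuel + 1 =>
    if l < r then
      let mid := PySem.Int.floordiv (l + r) 2
      if (PySem.List.pyGet? arr mid).getD 0 ≠ mid then
        findLoop arr fuel (mid + 1) r
      else
        findLoop arr fuel l (mid - 1)
    else
      (PySem.List.pyGet? arr l).getD 0

def find (arr : List Int) : Int :=
  findLoop arr ((arr.length : Int) - 1).toNat.succ 0 ((arr.length : Int) - 1)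

-- ===== PORT B =====
-- recursive helper go(l, n): offset l plus interval LENGTH n (a Nat, so the recursion is
-- structural on n with no fuel); half = (n-1)//2 in Nat arithmetic, midpoint l + half.
def findGo (arr : List Int) (l : Int) (n : Nat) : Int :=
  if h : n ≤ 1 then
    (PySem.List.pyGet? arr l).getD 0
  else
    let half := (n - 1) / 2
    let mid := l + (half : Int)
    if (PySem.List.pyGet? arr mid).getD 0 = mid then
      findGo arr l half
    else
      findGo arr (mid + 1) (n - half - 1)
termination_by n
decreasing_by all_goals omega

def find_alt (arr : List Int) : Int := findGo arr 0 arr.length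

-- ===== PRECONDITION & SPEC =====
-- Pre_ excludes only the empty list, on which A (and B) raise IndexError at arr[l]
def Pre_find (arr : List Int) : Prop := arr ≠ []
instance (arr : List Int) : Decidable (Pre_find arr) := by unfold Pre_find; infer_instance
def pvWitness_find : List Int := [1, 1, 2]

def Spec_find (arr : List Int) (out : Int) : Prop := out = find_alt arr
instance (arr : List Int) (out : Int) : Decidable (Spec_find arr out) := by unfold Spec_find; infer_instance

-- ===== CLAIM (what is proved, stated in full; the proofs are below) =====
def Claim_equal_find : Prop := ∀ (arr : List Int), Dom_find arr → Pre_find arr → Spec_find arr (find arr)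

-- ===== LEMMAS AND PROOFS =====

-- bridge: A's (l, r) state corresponds to B's (l, n) state by n = (r - l + 1).toNat,
-- provided the fuel covers the interval length; both take the same decision at each step.
theorem findLoop_eq_findGo (fuel : Nat) (arr : List Int) (l r : Int)
    (hn : (r - l + 1).toNat ≤ fuel) :
    findLoop arr fuel l r = findGo arr l (r - l + 1).toNat := by
  induction fuel generalizing l r with
  | zero =>
      rw [findGo]
      simp only [findLoop]
      rw [dif_pos (by omega)]
  | succ f ih =>
      rw [findGo]
      simp only [findLoop]
      by_cases hlr : l < r
      · rw [if_pos hlr, dif_neg (by omega)]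
        have hmid : PySem.Int.floordiv (l + r) 2 = l + (((r - l + 1).toNat - 1) / 2 : Nat) := by
          have h2 : (0:Int) < 2 := by omega
          rw [PySem.Int.floordiv_eq_ediv_of_pos h2]
          omega
        rw [hmid]
        by_cases heq : (PySem.List.pyGet? arr (l + (((r - l + 1).toNat - 1) / 2 : Nat))).getD 0
            = l + (((r - l + 1).toNat - 1) / 2 : Nat)
        · -- arr[mid] == mid: narrow to the left half
          rw [if_neg (by simpa using heq), if_pos heq,
            ih l (l + (((r - l + 1).toNat - 1) / 2 : Nat) - 1) (by omega)]
          congr 1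
          omega
        · -- arr[mid] != mid: move to the right half
          rw [if_pos heq, if_neg heq,
            ih (l + (((r - l + 1).toNat - 1) / 2 : Nat) + 1) r (by omega)]
          congr 1
          omega
      · rw [if_neg hlr, dif_pos (by omega)]

-- ===== VERDICT (by name: the statement is the Claim_ definition above) =====
theorem find_spec : Claim_equal_find := by
  intro arr _ _
  unfold Spec_find find find_alt
  rw [findLoop_eq_findGo _ _ _ _ (by omega)]
  congr 1
  omega
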